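-- pv_equiv track=rewrite | github.com/JaredLGillespie/InterviewBit | Python/weekly_01_03.py | bucket_base
-- ===== SOURCE A (Python) =====
-- def bucket_base(size, bucket_memo):
--     if size in bucket_memo: return bucket_memo[size]
--     ns = size
--
--     n = 0
--     while size > 0:
--         n += size
--         size //= 10
--     bucket_memo[ns] = n
--
--     return n
-- ===== SOURCE B (Python) =====
-- def bucket_base(size, bucket_memo):
--     cached = bucket_memo.get(size)
--     if cached is not None:
--         return cached
--
--     # count decimal digits of size by growing a power of ten
--     d = 0
--     p = 1
--     while p <= size:
--         p *= 10
--         d += 1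
--
--     n = sum(size // 10 ** k for k in range(d))
--     bucket_memo[size] = n
--     return n
-- ===== Notes on version B (the rewrite author's own statement) =====
-- stated objective: alternative
-- what changed: Instead of repeatedly floor-dividing the size down while accumulating, B first finds the digit count d by growing a power of ten, then sums the d independent quotients size // 10**k over range(d).
import Mathlib
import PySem

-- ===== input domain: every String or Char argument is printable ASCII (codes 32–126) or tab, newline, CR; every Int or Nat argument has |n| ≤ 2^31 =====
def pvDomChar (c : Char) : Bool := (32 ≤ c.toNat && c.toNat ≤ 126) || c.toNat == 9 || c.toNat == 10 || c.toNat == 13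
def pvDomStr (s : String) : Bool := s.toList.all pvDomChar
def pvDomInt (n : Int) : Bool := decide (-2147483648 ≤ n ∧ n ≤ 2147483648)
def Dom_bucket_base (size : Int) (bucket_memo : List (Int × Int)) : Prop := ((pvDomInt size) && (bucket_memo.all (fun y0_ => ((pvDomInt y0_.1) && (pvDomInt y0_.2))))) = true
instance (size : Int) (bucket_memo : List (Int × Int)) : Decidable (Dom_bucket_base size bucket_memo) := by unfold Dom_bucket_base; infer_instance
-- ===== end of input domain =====

-- B replaces A's single accumulate-while-dividing loop by two independent phases: find the digit
-- count d by growing a power of ten, then sum the quotients size // 10**k for k < d (alternative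
-- decomposition, same cost). Both mutate bucket_memo identically (one insertion of the original
-- key); the equivalence proved here is about the RETURN value only.

-- ===== PORT A =====
-- A's while-loop: `while size > 0: n += size; size //= 10`
def bbLoopA (size n : Int) : Int :=
  if 0 < size then bbLoopA (PySem.Int.floordiv size 10) (n + size) else n
termination_by size.toNat
decreasing_by
  rename_i h
  rw [PySem.Int.floordiv_eq_ediv_of_pos (by norm_num)]
  omega

def bucket_base (size : Int) (bucket_memo : List (Int × Int)) : Int :=
  match (PySem.Dict.mk bucket_memo).get? size with
  | some v => v
  | none => bbLoopA size 0

-- ===== PORT B =====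
-- B's digit-count loop: `while p <= size: p *= 10; d += 1` (the `1 ≤ p` conjunct only makes the
-- recursion total; the entry point always starts at p = 1, where it is exact)
def bbDigits (size p : Int) : Int :=
  if 1 ≤ p ∧ p ≤ size then 1 + bbDigits size (p * 10) else 0
termination_by (size + 1 - p).toNat
decreasing_by
  rename_i h
  omega

-- `sum(size // 10 ** k for k in range(d))`; k drawn from range(d) is nonnegative, so `.toNat` on
-- the exponent is exact
def bucket_base_alt (size : Int) (bucket_memo : List (Int × Int)) : Int :=
  match (PySem.Dict.mk bucket_memo).get? size with
  | some v => v
  | none =>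
      let d := bbDigits size 1
      ((PySem.List.pyRange 0 d 1).map
        (fun k => PySem.Int.floordiv size (10 ^ k.toNat))).sum

-- ===== PRECONDITION & SPEC =====
def Spec_bucket_base (size : Int) (bucket_memo : List (Int × Int)) (out : Int) : Prop := out = bucket_base_alt size bucket_memo
instance (size : Int) (bucket_memo : List (Int × Int)) (out : Int) : Decidable (Spec_bucket_base size bucket_memo out) := by unfold Spec_bucket_base; infer_instance

-- ===== CLAIM (what is proved, stated in full; the proofs are below) =====
def Claim_equal_bucket_base : Prop := ∀ (size : Int) (bucket_memo : List (Int × Int)), Dom_bucket_base size bucket_memo → Spec_bucket_base size bucket_memo (bucket_base size bucket_memo)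

-- ===== LEMMAS AND PROOFS =====

theorem bbDigits_nonneg (size p : Int) : 0 ≤ bbDigits size p := by
  rw [bbDigits]
  split
  · have := bbDigits_nonneg size (p * 10)
    omega
  · omega
termination_by (size + 1 - p).toNat
decreasing_by omega

theorem bbDigits_bound (size : Int) : ∀ p : Int, 1 ≤ p → size < p * 10 ^ (bbDigits size p).toNat := by
  intro p hp
  rw [bbDigits]
  split
  · rename_i h
    have hrec := bbDigits_bound size (p * 10) (by omega)
    have hnn := bbDigits_nonneg size (p * 10)
    have : (1 + bbDigits size (p * 10)).toNat = (bbDigits size (p * 10)).toNat + 1 := by omega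
    rw [this, pow_succ]
    calc size < p * 10 * 10 ^ (bbDigits size (p * 10)).toNat := hrec
      _ = p * (10 ^ (bbDigits size (p * 10)).toNat * 10) := by ring
  · rename_i h
    simp only [Int.toNat_zero, pow_zero, mul_one]
    omega
termination_by p => (size + 1 - p).toNat
decreasing_by omega

-- the loop's value is the sum of the quotients by growing powers of ten, for any d with size < 10^d
theorem bbLoopA_eq_sum (d : Nat) : ∀ (size n : Int), 0 ≤ size → size < 10 ^ d →
    bbLoopA size n = n + ((List.range d).map (fun k => size / 10 ^ k)).sum := by
  induction d with
  | zero =>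
      intro size n h0 hlt
      have h1 : (10:Int) ^ 0 = 1 := pow_zero _
      have : size = 0 := by omega
      subst this
      rw [bbLoopA]
      simp
  | succ d ih =>
      intro size n h0 hlt
      rw [bbLoopA]
      by_cases hpos : 0 < size
      · rw [if_pos hpos, PySem.Int.floordiv_eq_ediv_of_pos (by norm_num)]
        have h10 : (0:Int) < 10 := by norm_num
        have hq0 : 0 ≤ size / 10 := Int.ediv_nonneg h0 (by norm_num)
        have hqlt : size / 10 < 10 ^ d := by
          rw [Int.ediv_lt_iff_lt_mul h10]
          calc size < 10 ^ (d + 1) := hlt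
            _ = 10 ^ d * 10 := by ring
        rw [ih (size / 10) (n + size) hq0 hqlt]
        have hdd : ∀ k : Nat, size / 10 / 10 ^ k = size / 10 ^ (k + 1) := by
          intro k
          rw [Int.ediv_ediv_of_nonneg (by norm_num), ← pow_succ']
        have : ((List.range d).map (fun k => size / 10 / 10 ^ k)).sum
            = ((List.range d).map (fun k => size / 10 ^ (k + 1))).sum := by
          congr 1
          exact List.map_congr_left (fun k _ => hdd k)
        rw [this, List.range_succ_eq_map, List.map_cons, List.map_map, List.sum_cons]
        simp only [Function.comp_def, Nat.succ_eq_add_one, pow_zero, Int.ediv_one]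
        ring
      · rw [if_neg hpos]
        have hz : size = 0 := by omega
        subst hz
        simp

-- ===== VERDICT (by name: the statement is the Claim_ definition above) =====
theorem bucket_base_spec : Claim_equal_bucket_base := by
  intro size bucket_memo _
  unfold Spec_bucket_base bucket_base bucket_base_alt
  cases (PySem.Dict.mk bucket_memo).get? size with
  | some v => rfl
  | none =>
      simp only
      by_cases h0 : 0 ≤ size
      · have hb := bbDigits_bound size 1 (by norm_num)
        have hnn := bbDigits_nonneg size 1
        rw [bbLoopA_eq_sum (bbDigits size 1).toNat size 0 h0 (by simpa using hb)]
        rw [PySem.List.pyRange_one]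
        simp only [sub_zero, List.map_map]
        rw [zero_add]
        congr 1
        refine List.map_congr_left fun k hk => ?_
        simp only [Function.comp_apply, zero_add, Int.toNat_natCast]
        rw [PySem.Int.floordiv_eq_ediv_of_pos (by positivity)]
      · -- size < 0: the loop body never runs and the digit count is 0
        rw [bbLoopA, if_neg (by omega), bbDigits, if_neg (by omega)]
        simp
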